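-- pv_equiv track=rewrite | github.com/anju777/Advent-of-Code | 2024/08.py | get_legend
-- ===== SOURCE A (Python) =====
-- def get_legend(x: str):
--     legend = dict()
--     for row, line in enumerate(x):
--         for col, symbol in enumerate(line):
--             if symbol != ".":
--                 if symbol not in legend:
--                     legend[symbol] = list()
--                 legend[symbol].append((row, col))
--
--     return legend
-- ===== SOURCE B (Python) =====
-- def get_legend(x: str):
--     cells = [(sym, r, c) for r, line in enumerate(x)
--                          for c, sym in enumerate(line) if sym != "."]
--     keys = dict.fromkeys(sym for sym, _, _ in cells)
--     return {s: [(r, c) for t, r, c in cells if t == s] for s in keys}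
-- ===== Notes on version B (the rewrite author's own statement) =====
-- stated objective: alternative
-- what changed: Instead of growing a dict cell-by-cell with a membership test and in-place list append, B first flattens the grid into one list of (symbol,row,col) triples, dedups the symbols in first-occurrence order, and builds the result with one comprehension per symbol.
import Mathlib
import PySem

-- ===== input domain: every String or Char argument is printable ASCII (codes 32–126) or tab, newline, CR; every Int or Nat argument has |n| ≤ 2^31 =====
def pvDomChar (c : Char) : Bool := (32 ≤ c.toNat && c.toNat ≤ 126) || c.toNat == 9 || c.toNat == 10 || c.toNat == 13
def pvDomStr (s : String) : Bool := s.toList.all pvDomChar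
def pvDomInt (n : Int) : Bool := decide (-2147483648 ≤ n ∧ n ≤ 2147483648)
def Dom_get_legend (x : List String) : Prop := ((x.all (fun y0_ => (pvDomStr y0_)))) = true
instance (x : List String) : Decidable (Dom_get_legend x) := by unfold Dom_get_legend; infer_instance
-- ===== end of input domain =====

-- B replaces A's incremental dict (membership test + in-place append per cell) by a
-- flatten-then-group decomposition over one flat list of (symbol,(row,col)) cells; objective: alternative.

-- ===== PORT A =====
def get_legend (x : List String) : List (String × List (Int × Int)) :=
  ((PySem.List.enumerate x).foldl (fun legend rl =>
      (PySem.List.enumerate rl.2.toList).foldl (fun legend cs =>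
        if String.ofList [cs.2] ≠ "." then
          let legend :=
            if legend.contains (String.ofList [cs.2]) = false then
              legend.insert (String.ofList [cs.2]) ([] : List (Int × Int))
            else legend
          legend.modify (String.ofList [cs.2]) [] (fun v => v ++ [(rl.1, cs.1)])
        else legend) legend)
    PySem.Dict.empty).items

-- ===== PORT B =====
def pvCells (x : List String) : List (String × (Int × Int)) :=
  (PySem.List.enumerate x).flatMap (fun rl =>
    (PySem.List.enumerate rl.2.toList).filterMap (fun cs =>
      if String.ofList [cs.2] ≠ "." then some (String.ofList [cs.2], (rl.1, cs.1)) else none))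

def get_legend_alt (x : List String) : List (String × List (Int × Int)) :=
  let cells := pvCells x
  let keys := PySem.List.dedup (cells.map (·.1))
  keys.map (fun s => (s, (cells.filter (fun p => p.1 == s)).map (·.2)))

-- ===== PRECONDITION & SPEC =====
def Spec_get_legend (x : List String) (out : List (String × List (Int × Int))) : Prop := out = get_legend_alt x
instance (x : List String) (out : List (String × List (Int × Int))) : Decidable (Spec_get_legend x out) := by unfold Spec_get_legend; infer_instance

-- ===== CLAIM (what is proved, stated in full; the proofs are below) =====
def Claim_equal_get_legend : Prop := ∀ (x : List String), Dom_get_legend x → Spec_get_legend x (get_legend x)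

-- ===== LEMMAS AND PROOFS =====

-- A's "insert empty list if new, then append" step is exactly a modify-with-default.
theorem pv_step_eq (d : PySem.Dict String (List (Int × Int))) (s : String) (rc : Int × Int) :
    (if d.contains s = false then d.insert s ([] : List (Int × Int)) else d).modify s []
        (fun v => v ++ [rc]) =
      d.modify s [] (fun v => v ++ [rc]) := by
  by_cases h : d.contains s = false
  · simp only [h, if_pos]
    unfold PySem.Dict.modify
    rw [PySem.Dict.getD_insert_self, PySem.Dict.insert_insert_self,
      PySem.Dict.getD_of_not_contains d [] h]
  · simp [h]

-- a guarded fold is the fold over the filterMap of the kept elements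
theorem pv_foldl_guard {β : Type} (P : β → Prop) [DecidablePred P] (key : β → String)
    (rc : β → Int × Int) (l : List β) (d : PySem.Dict String (List (Int × Int))) :
    l.foldl (fun d y => if P y then d.modify (key y) [] (fun v => v ++ [rc y]) else d) d =
      (l.filterMap (fun y => if P y then some (key y, rc y) else none)).foldl
        (fun d p => d.modify p.1 [] (fun v => v ++ [p.2])) d := by
  induction l generalizing d with
  | nil => rfl
  | cons y l ih =>
    by_cases h : P y
    · simp only [List.foldl_cons, List.filterMap_cons, if_pos h, ih]
    · simp only [List.foldl_cons, List.filterMap_cons, if_neg h, ih]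

theorem pv_foldl_flatMap {β κ δ : Type} (f : β → List κ) (g : δ → κ → δ)
    (l : List β) (d : δ) :
    (l.flatMap f).foldl g d = l.foldl (fun d y => (f y).foldl g d) d := by
  induction l generalizing d with
  | nil => rfl
  | cons y l ih => simp [List.flatMap_cons, List.foldl_append, ih]

-- A's nested loop is the grouping fold over the flat cell list
theorem pv_get_legend_eq_fold (x : List String) :
    get_legend x =
      ((pvCells x).foldl
        (fun d p => d.modify p.1 [] (fun v => v ++ [p.2])) PySem.Dict.empty).items := by
  unfold get_legend pvCells
  rw [pv_foldl_flatMap]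
  congr 1
  apply PySem.List.foldl_congr_mem
  intro d rl _
  refine Eq.trans (PySem.List.foldl_congr_mem _ _
      (fun d (cs : Int × Char) => if String.ofList [cs.2] ≠ "." then
        d.modify (String.ofList [cs.2]) [] (fun v => v ++ [(rl.1, cs.1)]) else d) d ?_)
    (pv_foldl_guard (fun (cs : Int × Char) => String.ofList [cs.2] ≠ ".")
      (fun cs => String.ofList [cs.2]) (fun cs => (rl.1, cs.1)) _ d)
  intro d cs _
  by_cases h : String.ofList [cs.2] = "."
  · simp [h]
  · simp only [h, ne_eq, not_false_eq_true, if_true]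
    exact pv_step_eq d (String.ofList [cs.2]) (rl.1, cs.1)

-- ===== VERDICT (by name: the statement is the Claim_ definition above) =====
theorem get_legend_spec : Claim_equal_get_legend := by
  intro x _
  unfold Spec_get_legend get_legend_alt
  rw [pv_get_legend_eq_fold]
  set cells := pvCells x with hc
  have hkeys : ((cells.foldl
      (fun d p => d.modify p.1 [] (fun v => v ++ [p.2])) PySem.Dict.empty)).keys =
      PySem.List.dedup (cells.map (·.1)) := by
    rw [PySem.Dict.keys_foldl_modify_key cells (·.1) [] (fun _ p => fun v => v ++ [p.2])]
    simp [PySem.Dict.keys_empty, PySem.Set.update, PySem.Set.ofList]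
  have hnd : ((cells.foldl
      (fun d p => d.modify p.1 [] (fun v => v ++ [p.2])) PySem.Dict.empty)).keys.Nodup := by
    exact PySem.Dict.nodup_keys_foldl_modify_key cells (·.1) [] (fun _ p => fun v => v ++ [p.2])
      PySem.Dict.empty PySem.Dict.nodup_keys_empty
  rw [PySem.Dict.items_eq_map_keys _ hnd ([] : List (Int × Int)), hkeys]
  apply List.map_congr_left
  intro s _
  rw [PySem.Dict.getD_foldl_modify_append cells PySem.Dict.empty s]
  simp [PySem.Dict.getD_empty]
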